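-- pv_equiv track=rewrite | github.com/rayL-K/ToDOCX | src/latex_formatter.py | _unescape_latex
-- ===== SOURCE A (Python) =====
-- def _unescape_latex(text: str) -> str:
--     """处理 LaTeX 转义字符"""
--     # 注意：这里使用字面字符串，不是正则表达式
--     # LaTeX 转义字符在文本中的形式
--     escapes = [
--         ('\\_', '_'),   # 下划线
--         ('\\%', '%'),   # 百分号
--         ('\\&', '&'),   # 与号
--         ('\\#', '#'),   # 井号
--         ('\\~', '~'),   # 波浪号
--         ('\\^', '^'),   # 脱字符
--         ('\\{', '{'),   # 左大括号
--         ('\\}', '}'),   # 右大括号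
--         ('\\$', '$'),   # 美元符号
--     ]
--     for latex, char in escapes:
--         text = text.replace(latex, char)
--     return text
-- ===== SOURCE B (Python) =====
-- def _unescape_latex(text: str) -> str:
--     """Single left-to-right scan instead of nine sequential replace passes."""
--     escapable = '_%&#~^{}$'
--     out = []
--     i = 0
--     n = len(text)
--     while i < n:
--         if text[i] == '\\' and i + 1 < n and text[i + 1] in escapable:
--             out.append(text[i + 1])
--             i += 2
--         else:
--             out.append(text[i])
--             i += 1
--     return ''.join(out)
-- ===== Notes on version B (the rewrite author's own statement) =====
-- stated objective: alternative
-- what changed: Replaced nine sequential whole-string str.replace passes by a single left-to-right index scan that collapses each escape sequence for the nine escapable characters in one traversal.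
import Mathlib
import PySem

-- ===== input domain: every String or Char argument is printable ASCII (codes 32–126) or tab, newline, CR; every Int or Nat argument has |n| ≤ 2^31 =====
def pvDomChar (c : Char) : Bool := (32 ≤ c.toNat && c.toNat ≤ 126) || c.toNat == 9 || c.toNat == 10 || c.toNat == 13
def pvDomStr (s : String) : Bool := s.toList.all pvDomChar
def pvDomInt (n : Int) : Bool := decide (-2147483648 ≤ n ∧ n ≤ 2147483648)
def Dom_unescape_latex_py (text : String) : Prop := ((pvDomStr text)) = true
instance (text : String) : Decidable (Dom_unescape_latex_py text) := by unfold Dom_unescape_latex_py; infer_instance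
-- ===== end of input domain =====

-- B replaces A's nine sequential str.replace passes by one left-to-right index scan (objective: alternative single-pass algorithm).

-- ===== PORT A =====
-- the escapes table of A, in A's order
def pvEscapes : List (String × String) :=
  [("\\_", "_"), ("\\%", "%"), ("\\&", "&"), ("\\#", "#"), ("\\~", "~"),
   ("\\^", "^"), ("\\{", "{"), ("\\}", "}"), ("\\$", "$")]

def unescape_latex_py (text : String) : String :=
  pvEscapes.foldl (fun t lc => PySem.Str.replace t lc.1 lc.2) text

-- ===== PORT B =====
-- the nine escapable characters (B's string '_%&#~^{}$')
def pvEscChars : List Char := ['_', '%', '&', '#', '~', '^', '{', '}', '$']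

-- B's while-loop over the index: at a backslash whose successor exists and is escapable,
-- emit that successor and advance by 2 (drop two chars); else emit the current char and
-- advance by 1.  ('c in str' on a single char is ported exactly as list membership.)
def pvScanB : List Char → List Char
  | [] => []
  | x :: t =>
    if x = '\\' then
      match t with
      | [] => ['\\']
      | d :: t' => if pvEscChars.contains d then d :: pvScanB t' else '\\' :: pvScanB (d :: t')
    else x :: pvScanB t
termination_by l => l.length
decreasing_by all_goals simp_all

def unescape_latex_py_alt (text : String) : String :=
  String.ofList (pvScanB text.toList)

-- ===== PRECONDITION & SPEC =====
def Spec_unescape_latex_py (text : String) (out : String) : Prop := out = unescape_latex_py_alt text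
instance (text : String) (out : String) : Decidable (Spec_unescape_latex_py text out) := by unfold Spec_unescape_latex_py; infer_instance

-- ===== CLAIM (what is proved, stated in full; the proofs are below) =====
def Claim_equal_unescape_latex_py : Prop := ∀ (text : String), Dom_unescape_latex_py text → Spec_unescape_latex_py text (unescape_latex_py text)

-- ===== LEMMAS AND PROOFS =====

-- the scanner with an arbitrary escapable-set predicate (proof tool)
def pvScan (p : Char → Bool) : List Char → List Char
  | [] => []
  | x :: t =>
    if x = '\\' then
      match t with
      | [] => ['\\']
      | d :: t' => if p d then d :: pvScan p t' else '\\' :: pvScan p (d :: t')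
    else x :: pvScan p t
termination_by l => l.length
decreasing_by all_goals simp_all

-- one backslash-removing replace pass as a structural two-char scanner
def pvRepl1 (c : Char) : List Char → List Char
  | [] => []
  | x :: t =>
    if x = '\\' then
      match t with
      | [] => ['\\']
      | d :: t' => if d = c then c :: pvRepl1 c t' else '\\' :: pvRepl1 c (d :: t')
    else x :: pvRepl1 c t
termination_by l => l.length
decreasing_by all_goals simp_all

theorem pvGo (c : Char) (hc : c ≠ '\\') :
    ∀ (fuel : Nat) (l acc : List Char), l.length ≤ fuel →
    PySem.Chars.replace.go ['\\', c] [c] fuel l acc = acc.reverse ++ pvRepl1 c l := by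
  intro fuel
  induction fuel with
  | zero =>
    intro l acc h
    have : l = [] := by cases l <;> simp_all
    subst this
    simp [PySem.Chars.replace.go, pvRepl1]
  | succ n ih =>
    intro l acc h
    match l with
    | [] => simp [PySem.Chars.replace.go, pvRepl1]
    | x :: t =>
      rw [PySem.Chars.replace.go]
      by_cases hpre : (['\\', c].isPrefixOf (x :: t)) = true
      · match t, hpre with
        | [], hpre => simp [List.isPrefixOf] at hpre
        | c' :: t', hpre =>
          simp [List.isPrefixOf] at hpre
          obtain ⟨hx, hcc⟩ := hpre
          subst hx; subst hcc
          rw [if_pos (by simp [List.isPrefixOf])]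
          simp only [List.length_cons, List.drop_succ_cons, List.drop_zero, List.reverse_singleton,
            List.singleton_append, List.length_nil]
          rw [ih t' (c :: acc) (by simp at h ⊢; omega)]
          conv_rhs => rw [pvRepl1.eq_def]
          simp
      · rw [if_neg hpre]
        rw [ih t (x :: acc) (by simp at h ⊢; omega)]
        by_cases hx : x = '\\'
        · subst hx
          match t with
          | [] => rw [pvRepl1.eq_def]; simp [pvRepl1]
          | d :: t' =>
            have hd : d ≠ c := by
              intro hdc; subst hdc; simp [List.isPrefixOf] at hpre
            conv_rhs => rw [pvRepl1.eq_def]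
            simp [hd]
        · conv_rhs => rw [pvRepl1.eq_def]
          simp [hx]

theorem pvRepl1_eq_replace (c : Char) (hc : c ≠ '\\') (l : List Char) :
    PySem.Chars.replace l ['\\', c] [c] = pvRepl1 c l := by
  rw [PySem.Chars.replace]
  simp [pvGo c hc l.length l [] (le_refl _)]

-- Str.replace with a two-char pattern, stated for the string literals the port uses
theorem pvStrRepl1 (c : Char) (hc : c ≠ '\\') (old new : String)
    (hold : old.toList = ['\\', c]) (hnew : new.toList = [c]) (s : String) :
    PySem.Str.replace s old new = String.ofList (pvRepl1 c s.toList) := by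
  rw [PySem.Str.replace, hold, hnew, pvRepl1_eq_replace c hc]

-- scan's output on d :: t' starts with a char ≠ c, when d ≠ c, c ∉ p, c ≠ '\'
theorem pvScan_head_ne (c : Char) (p : Char → Bool) (hc : c ≠ '\\') (hpc : p c = false)
    (d : Char) (t' : List Char) (hd : d ≠ c) :
    ∃ h t, pvScan p (d :: t') = h :: t ∧ h ≠ c := by
  rw [pvScan.eq_def]
  by_cases hx : d = '\\'
  · subst hx

    match t' with
    | [] => exact ⟨'\\', [], rfl, Ne.symm hc⟩
    | e :: t'' =>
      by_cases he : p e
      · refine ⟨e, pvScan p t'', by simp [he], ?_⟩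
        intro hec; subst hec; simp [hpc] at he
      · exact ⟨'\\', pvScan p (e :: t''), by simp [he], Ne.symm hc⟩
  · exact ⟨d, pvScan p t', by simp [hx], hd⟩

-- one replace pass after a scan = the scan with the char added to the escapable set
theorem pvRepl1_scan_aux (c : Char) (p : Char → Bool) (hc : c ≠ '\\')
    (hpb : p '\\' = false) (hpc : p c = false) :
    ∀ (n : Nat) (l : List Char), l.length ≤ n →
    pvRepl1 c (pvScan p l) = pvScan (fun d => d == c || p d) l := by
  intro n
  induction n with
  | zero =>
    intro l h
    have : l = [] := by cases l <;> simp_all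
    subst this
    simp [pvScan, pvRepl1]
  | succ n ih =>
    intro l h
    match l with
    | [] => simp [pvScan, pvRepl1]
    | x :: t =>
      by_cases hx : x = '\\'
      · subst hx
        match t with
        | [] => simp [pvScan, pvRepl1]
        | d :: t' =>
          by_cases hd : d = c
          · subst hd
            conv_lhs => rw [pvScan.eq_def]
            simp only [hpc, Bool.false_eq_true, if_false]
            conv_lhs => rw [pvScan.eq_def]
            by_cases hdb : d = '\\'
            · exact absurd hdb hc
            · simp only [if_neg hdb]
              rw [pvRepl1.eq_def]
              simp only [if_true]
              conv_rhs => rw [pvScan.eq_def]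
              simp only [beq_self_eq_true, Bool.true_or, if_pos]
              rw [ih t' (by simp at h; omega)]
          · by_cases hpd : p d
            · conv_lhs => rw [pvScan.eq_def]
              simp only [hpd, if_true]
              have hdb : d ≠ '\\' := by intro hh; subst hh; simp [hpb] at hpd
              rw [pvRepl1.eq_def]
              simp only [if_neg hdb]
              rw [ih t' (by simp at h; omega)]
              conv_rhs => rw [pvScan.eq_def]
              simp only [hpd, Bool.or_true, if_pos]
            · conv_lhs => rw [pvScan.eq_def]
              simp only [hpd, Bool.false_eq_true, if_false]
              obtain ⟨hh, tt, hs, hne⟩ := pvScan_head_ne c p hc hpc d t' hd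
              rw [hs, pvRepl1.eq_def]
              simp only [if_true]
              simp only [if_neg hne]
              rw [← hs, ih (d :: t') (by simp at h ⊢; omega)]
              conv_rhs => rw [pvScan.eq_def]
              have hq : (d == c || p d) = false := by simp [hd, hpd]
              simp only [hq, Bool.false_eq_true, if_false, if_true]
      · conv_lhs => rw [pvScan.eq_def]
        simp only [if_neg hx]
        rw [pvRepl1.eq_def]
        simp only [if_neg hx]
        rw [ih t (by simp at h; omega)]
        conv_rhs => rw [pvScan.eq_def]
        simp only [if_neg hx]

theorem pvRepl1_scan (c : Char) (p : Char → Bool) (hc : c ≠ '\\')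
    (hpb : p '\\' = false) (hpc : p c = false) (l : List Char) :
    pvRepl1 c (pvScan p l) = pvScan (fun d => d == c || p d) l :=
  pvRepl1_scan_aux c p hc hpb hpc l.length l (le_refl _)

theorem pvScan_congr_aux (p q : Char → Bool) (hpq : ∀ d, p d = q d) :
    ∀ (n : Nat) (l : List Char), l.length ≤ n → pvScan p l = pvScan q l := by
  intro n
  induction n with
  | zero =>
    intro l h
    have : l = [] := by cases l <;> simp_all
    subst this; simp [pvScan]
  | succ n ih =>
    intro l h
    match l with
    | [] => simp [pvScan]
    | x :: t =>
      rw [pvScan.eq_def, pvScan.eq_def (p := q)]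
      by_cases hx : x = '\\'
      · simp only [if_pos hx]
        match t with
        | [] => rfl
        | d :: t' =>
          simp only []
          rw [← hpq d]
          by_cases hpd : p d
          · simp only [hpd, if_true]
            rw [ih t' (by simp at h; omega)]
          · simp only [hpd, Bool.false_eq_true, if_false]
            rw [ih (d :: t') (by simp at h ⊢; omega)]
      · simp only [if_neg hx]
        rw [ih t (by simp at h; omega)]

theorem pvScan_congr (p q : Char → Bool) (hpq : ∀ d, p d = q d) (l : List Char) :
    pvScan p l = pvScan q l :=
  pvScan_congr_aux p q hpq l.length l (le_refl _)

-- scanning with the empty escapable set is the identity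
theorem pvScan_false : ∀ (n : Nat) (l : List Char), l.length ≤ n →
    pvScan (fun _ => false) l = l := by
  intro n
  induction n with
  | zero =>
    intro l h
    have : l = [] := by cases l <;> simp_all
    subst this; simp [pvScan]
  | succ n ih =>
    intro l h
    match l with
    | [] => simp [pvScan]
    | x :: t =>
      rw [pvScan.eq_def]
      by_cases hx : x = '\\'
      · simp only [if_pos hx]
        match t with
        | [] => rw [hx]
        | d :: t' =>
          simp only [Bool.false_eq_true, if_false]
          rw [ih (d :: t') (by simp at h ⊢; omega), hx]
      · simp only [if_neg hx]
        rw [ih t (by simp at h; omega)]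

-- B's concrete scanner is the generic scanner at the escapable-set predicate
theorem pvScanB_eq_scan_aux : ∀ (n : Nat) (l : List Char), l.length ≤ n →
    pvScanB l = pvScan (fun d => pvEscChars.contains d) l := by
  intro n
  induction n with
  | zero =>
    intro l h
    have : l = [] := by cases l <;> simp_all
    subst this; simp [pvScan, pvScanB]
  | succ n ih =>
    intro l h
    match l with
    | [] => simp [pvScan, pvScanB]
    | x :: t =>
      rw [pvScan.eq_def, pvScanB.eq_def]
      by_cases hx : x = '\\'
      · simp only [if_pos hx]
        match t with
        | [] => rfl
        | d :: t' =>
          by_cases hpd : pvEscChars.contains d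
          · simp only [hpd, if_true]
            rw [ih t' (by simp at h; omega)]
          · simp only [hpd, Bool.false_eq_true, if_false]
            rw [ih (d :: t') (by simp at h ⊢; omega)]
      · simp only [if_neg hx]
        rw [ih t (by simp at h; omega)]

theorem pvScanB_eq_scan (l : List Char) :
    pvScanB l = pvScan (fun d => pvEscChars.contains d) l :=
  pvScanB_eq_scan_aux l.length l (le_refl _)

-- ===== VERDICT (by name: the statement is the Claim_ definition above) =====
theorem unescape_latex_py_spec : Claim_equal_unescape_latex_py := by
  unfold Claim_equal_unescape_latex_py
  intro text _
  unfold Spec_unescape_latex_py unescape_latex_py unescape_latex_py_alt pvEscapes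
  simp only [List.foldl]
  rw [pvStrRepl1 '$' (by decide) _ _ (by decide) (by decide)]
  rw [pvStrRepl1 '}' (by decide) _ _ (by decide) (by decide)]
  rw [pvStrRepl1 '{' (by decide) _ _ (by decide) (by decide)]
  rw [pvStrRepl1 '^' (by decide) _ _ (by decide) (by decide)]
  rw [pvStrRepl1 '~' (by decide) _ _ (by decide) (by decide)]
  rw [pvStrRepl1 '#' (by decide) _ _ (by decide) (by decide)]
  rw [pvStrRepl1 '&' (by decide) _ _ (by decide) (by decide)]
  rw [pvStrRepl1 '%' (by decide) _ _ (by decide) (by decide)]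
  rw [pvStrRepl1 '_' (by decide) _ _ (by decide) (by decide)]
  simp only [String.toList_ofList]
  rw [← pvScan_false text.toList.length text.toList (le_refl _)]
  rw [pvRepl1_scan '_' _ (by decide) (by decide) (by decide)]
  rw [pvRepl1_scan '%' _ (by decide) (by decide) (by decide)]
  rw [pvRepl1_scan '&' _ (by decide) (by decide) (by decide)]
  rw [pvRepl1_scan '#' _ (by decide) (by decide) (by decide)]
  rw [pvRepl1_scan '~' _ (by decide) (by decide) (by decide)]
  rw [pvRepl1_scan '^' _ (by decide) (by decide) (by decide)]
  rw [pvRepl1_scan '{' _ (by decide) (by decide) (by decide)]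
  rw [pvRepl1_scan '}' _ (by decide) (by decide) (by decide)]
  rw [pvRepl1_scan '$' _ (by decide) (by decide) (by decide)]
  rw [pvScanB_eq_scan]
  rw [pvScan_congr _ (fun d => pvEscChars.contains d)
    (by intro d; rw [Bool.eq_iff_iff]; simp [pvEscChars]; tauto)]
  rw [pvScan_false text.toList.length text.toList (le_refl _)]
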